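-- pv_equiv track=rewrite | github.com/MrBrantCode/unitest_baseline | mut_generate/mist_train_taco/taco_8345/solution.py | format_stepan_word
-- ===== SOURCE A (Python) =====
-- def format_stepan_word(s: str, n: int = None) -> str:
--     if n is None:
--         n = len(s)
--
--     vowels = frozenset({'a', 'e', 'i', 'o', 'u', 'y'})
--     ans = []
--     met = False
--     cdel = False
--
--     for i in range(n):
--         if i > 0:
--             if s[i] != s[i - 1]:
--                 met = False
--                 cdel = False
--                 ans.append(s[i])
--             elif s[i] in vowels:
--                 if s[i] == 'e' or s[i] == 'o':
--                     if not met: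
--                         ans.append(s[i])
--                     elif not cdel:
--                         ans.pop()
--                         cdel = True
--                 met = True
--             else:
--                 ans.append(s[i])
--         else:
--             ans.append(s[i])
--
--     return ''.join(ans)
-- ===== SOURCE B (Python) =====
-- def format_stepan_word(s: str, n: int = None) -> str:
--     if n is None:
--         n = len(s)
--     # run-length encode the first-n characters (indexing raises exactly as A does for n > len(s))
--     runs = []
--     for i in range(n):
--         c = s[i]
--         if runs and runs[-1][0] == c:
--             runs[-1][1] += 1
--         else:
--             runs.append([c, 1])
--     # per-run rule: e/o keep 2 copies only when the run length is exactly 2, else 1;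
--     # other vowels collapse to 1; consonants keep the whole run
--     pieces = []
--     for c, L in runs:
--         if c in 'eo':
--             pieces.append(c * 2 if L == 2 else c)
--         elif c in 'aiuy':
--             pieces.append(c)
--         else:
--             pieces.append(c * L)
--     return ''.join(pieces)
-- ===== Notes on version B (the rewrite author's own statement) =====
-- stated objective: simpler
-- what changed: Replaced A's three-flag (prev/met/cdel) state machine with a run-length encoding of the prefix followed by a per-run rule (consonant run kept whole, a/i/u/y collapsed to one, e/o kept as two only when the run length is exactly 2).
import Mathlib
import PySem

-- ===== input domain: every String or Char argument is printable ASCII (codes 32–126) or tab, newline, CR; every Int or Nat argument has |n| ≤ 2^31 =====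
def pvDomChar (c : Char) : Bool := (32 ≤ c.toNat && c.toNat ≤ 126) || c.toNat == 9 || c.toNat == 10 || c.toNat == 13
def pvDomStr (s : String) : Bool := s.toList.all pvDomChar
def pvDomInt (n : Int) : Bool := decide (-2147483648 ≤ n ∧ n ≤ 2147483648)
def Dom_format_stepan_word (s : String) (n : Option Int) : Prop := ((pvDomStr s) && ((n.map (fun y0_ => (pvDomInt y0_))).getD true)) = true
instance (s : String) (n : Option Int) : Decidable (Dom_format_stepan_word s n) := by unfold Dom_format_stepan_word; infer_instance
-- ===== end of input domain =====

-- B replaces A's three-variable flag state machine by a run-length encoding plus a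
-- per-run rule (simpler decomposition; same O(n) cost).

-- ===== PORT A =====
def pvVowel (c : Char) : Bool :=
  c == 'a' || c == 'e' || c == 'i' || c == 'o' || c == 'u' || c == 'y'

-- A's loop over i in range(n): prev = s[i-1], state (met, cdel), accumulator ans
def aLoop : Char → Bool → Bool → List Char → List Char → List Char
  | _, _, _, ans, [] => ans
  | prev, met, cdel, ans, c :: rest =>
    if c != prev then aLoop c false false (ans ++ [c]) rest
    else if pvVowel c then
      (if c == 'e' || c == 'o' then
        (if !met then aLoop c true cdel (ans ++ [c]) rest
         else if !cdel then aLoop c true true ans.dropLast rest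
         else aLoop c true cdel ans rest)
       else aLoop c true cdel ans rest)
    else aLoop c met cdel (ans ++ [c]) rest

def format_stepan_word (s : String) (n : Option Int) : String :=
  let cs := s.toList
  let m := (n.getD (cs.length : Int)).toNat
  match cs.take m with
  | [] => ""
  | c :: rest => String.mk (aLoop c false false [c] rest)

-- ===== PORT B =====
-- B's first loop: run-length encoding; Python mutates runs[-1], here the accumulator
-- is kept reversed so the current run is the head, and reversed at the end.
def bRunsAux : List (Char × Nat) → List Char → List (Char × Nat)
  | acc, [] => acc.reverse
  | [], c :: cs => bRunsAux [(c, 1)] cs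
  | (c0, L) :: acc, c :: cs =>
    if c0 == c then bRunsAux ((c0, L + 1) :: acc) cs
    else bRunsAux ((c, 1) :: (c0, L) :: acc) cs

-- B's per-run rule
def bPiece (c : Char) (L : Nat) : List Char :=
  if c == 'e' || c == 'o' then (if L == 2 then [c, c] else [c])
  else if c == 'a' || c == 'i' || c == 'u' || c == 'y' then [c]
  else List.replicate L c

def format_stepan_word_alt (s : String) (n : Option Int) : String :=
  let cs := s.toList
  let m := (n.getD (cs.length : Int)).toNat
  let runs := bRunsAux [] (cs.take m)
  String.mk ((runs.map (fun r => bPiece r.1 r.2)).flatten)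

-- ===== PRECONDITION & SPEC =====
-- Pre_ excludes exactly the inputs where Python A raises IndexError (n > len(s));
-- B raises there too.
def Pre_format_stepan_word (s : String) (n : Option Int) : Prop :=
  n.getD ((s.toList.length : Int)) ≤ (s.toList.length : Int)
instance (s : String) (n : Option Int) : Decidable (Pre_format_stepan_word s n) := by
  unfold Pre_format_stepan_word; infer_instance

def pvWitness_format_stepan_word : String × Option Int := ("soon", none)

def Spec_format_stepan_word (s : String) (n : Option Int) (out : String) : Prop := out = format_stepan_word_alt s n
instance (s : String) (n : Option Int) (out : String) : Decidable (Spec_format_stepan_word s n out) := by unfold Spec_format_stepan_word; infer_instance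

-- ===== CLAIM (what is proved, stated in full; the proofs are below) =====
def Claim_equal_format_stepan_word : Prop := ∀ (s : String) (n : Option Int), Dom_format_stepan_word s n → Pre_format_stepan_word s n → Spec_format_stepan_word s n (format_stepan_word s n)

-- ===== LEMMAS AND PROOFS =====

-- result of A's loop on a whole list, fresh state
def aList : List Char → List Char
  | [] => []
  | c :: rest => aLoop c false false [c] rest

def bList (l : List Char) : List Char :=
  ((bRunsAux [] l).map (fun r => bPiece r.1 r.2)).flatten

-- prefix invariance of A's loop: with the invariant "cdel = false → ans ends with prev",
-- processing never pops below the accumulated prefix.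
theorem aLoop_append_left : ∀ (l : List Char) (prev : Char) (met cdel : Bool)
    (ans init : List Char), (cdel = false → ∃ a', ans = a' ++ [prev]) →
    aLoop prev met cdel (init ++ ans) l = init ++ aLoop prev met cdel ans l := by
  intro l
  induction l with
  | nil => intro prev met cdel ans init _; simp [aLoop]
  | cons c rest ih =>
    intro prev met cdel ans init h
    simp only [aLoop]
    by_cases hc : (c != prev) = true
    · simp only [hc, if_true]
      rw [List.append_assoc]
      exact ih c false false (ans ++ [c]) init (fun _ => ⟨ans, rfl⟩)
    · have hcp : c = prev := by simpa [bne] using hc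
      subst hcp
      simp only [hc, Bool.false_eq_true, if_false]
      by_cases hv : pvVowel c = true
      · simp only [hv, if_true]
        by_cases heo : (c == 'e' || c == 'o') = true
        · simp only [heo, if_true]
          cases met with
          | false =>
            simp only [Bool.not_false, if_true]
            rw [List.append_assoc]
            exact ih c true cdel (ans ++ [c]) init (fun _ => ⟨ans, rfl⟩)
          | true =>
            simp only [Bool.not_true, Bool.false_eq_true, if_false]
            cases cdel with
            | false =>
              obtain ⟨a', rfl⟩ := h rfl
              simp only [Bool.not_false, if_true]
              rw [← List.append_assoc, List.dropLast_concat, List.dropLast_concat]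
              exact ih c true true a' init (by simp)
            | true =>
              simp only [Bool.not_true, Bool.false_eq_true, if_false]
              exact ih c true true ans init (by simp)
        · simp only [heo, Bool.false_eq_true, if_false]
          exact ih c true cdel ans init h
      · simp only [hv, Bool.false_eq_true, if_false]
        rw [List.append_assoc]
        exact ih c met cdel (ans ++ [c]) init (fun _ => ⟨ans, rfl⟩)

-- skipping a run of a consonant: every repeat is appended, state unchanged
theorem aLoop_cons_run (c : Char) (hv : pvVowel c = false) : ∀ (k : Nat) (met cdel : Bool)
    (ans rest : List Char),
    aLoop c met cdel ans (List.replicate k c ++ rest) =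
      aLoop c met cdel (ans ++ List.replicate k c) rest := by
  intro k
  induction k with
  | zero => intro met cdel ans rest; simp
  | succ k ih =>
    intro met cdel ans rest
    rw [List.replicate_succ, List.cons_append]
    simp only [aLoop, bne_self_eq_false, Bool.false_eq_true, if_false, hv]
    rw [ih]
    simp

-- skipping a run of a/i/u/y: repeats are dropped, only met may change
theorem aLoop_aiuy_run (c : Char) (hv : pvVowel c = true)
    (heo : (c == 'e' || c == 'o') = false) : ∀ (k : Nat) (met cdel : Bool)
    (ans rest : List Char),
    aLoop c met cdel ans (List.replicate k c ++ rest) =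
      aLoop c (met || decide (0 < k)) cdel ans rest := by
  intro k
  induction k with
  | zero => intro met cdel ans rest; simp
  | succ k ih =>
    intro met cdel ans rest
    rw [List.replicate_succ, List.cons_append]
    simp only [aLoop, bne_self_eq_false, Bool.false_eq_true, if_false, hv, if_true, heo]
    rw [ih]
    simp

-- after the pop, further e/o repeats are ignored
theorem aLoop_eo_done (c : Char) (heo : (c == 'e' || c == 'o') = true) :
    ∀ (k : Nat) (ans rest : List Char),
    aLoop c true true ans (List.replicate k c ++ rest) = aLoop c true true ans rest := by
  have hv : pvVowel c = true := by
    simp only [Bool.or_eq_true, beq_iff_eq] at heo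
    rcases heo with h | h <;> simp [pvVowel, h]
  intro k
  induction k with
  | zero => intro ans rest; simp
  | succ k ih =>
    intro ans rest
    rw [List.replicate_succ, List.cons_append]
    simp only [aLoop, bne_self_eq_false, Bool.false_eq_true, if_false, hv, if_true, heo,
      Bool.not_true]
    exact ih ans rest

-- one maximal run, starting fresh with its first character already appended,
-- contributes exactly bPiece
theorem aLoop_run (c : Char) : ∀ (k : Nat) (ans rest : List Char),
    ∃ met cdel, aLoop c false false (ans ++ [c]) (List.replicate k c ++ rest) =
      aLoop c met cdel (ans ++ bPiece c (k + 1)) rest := by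
  intro k ans rest
  by_cases heo : (c == 'e' || c == 'o') = true
  · have hv : pvVowel c = true := by
      simp only [Bool.or_eq_true, beq_iff_eq] at heo
      rcases heo with h | h <;> simp [pvVowel, h]
    match k with
    | 0 => exact ⟨false, false, by simp [bPiece, heo]⟩
    | 1 =>
      refine ⟨true, false, ?_⟩
      rw [List.replicate_succ, List.replicate_zero, List.cons_append, List.nil_append]
      simp only [aLoop, bne_self_eq_false, Bool.false_eq_true, if_false, hv, if_true, heo,
        Bool.not_false]
      simp [bPiece, heo]
    | (j + 2) =>
      refine ⟨true, true, ?_⟩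
      rw [List.replicate_succ, List.cons_append]
      simp only [aLoop, bne_self_eq_false, Bool.false_eq_true, if_false, hv, if_true, heo,
        Bool.not_false]
      rw [List.replicate_succ, List.cons_append]
      simp only [aLoop, bne_self_eq_false, Bool.false_eq_true, if_false, hv, if_true, heo,
        Bool.not_true, Bool.not_false]
      rw [List.dropLast_concat]
      rw [aLoop_eo_done c heo]
      simp [bPiece, heo]
  · by_cases hv : pvVowel c = true
    · refine ⟨(false || decide (0 < k)), false, ?_⟩
      rw [aLoop_aiuy_run c hv (by simpa using heo)]
      have haiuy : (c == 'a' || c == 'i' || c == 'u' || c == 'y') = true := by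
        simp only [pvVowel, Bool.or_eq_true, beq_iff_eq] at hv
        simp only [Bool.or_eq_true, beq_iff_eq] at heo ⊢
        tauto
      simp [bPiece, heo, haiuy]
    · refine ⟨false, false, ?_⟩
      rw [aLoop_cons_run c (by simpa using hv)]
      have hv' : pvVowel c = false := by simpa using hv
      have haiuy : (c == 'a' || c == 'i' || c == 'u' || c == 'y') = false := by
        simp only [pvVowel, Bool.or_eq_false_iff] at hv'
        obtain ⟨⟨⟨⟨⟨ha, he⟩, hi⟩, ho⟩, hu⟩, hy⟩ := hv'
        simp [ha, hi, hu, hy]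
      simp [bPiece, heo, haiuy, List.replicate_succ]

-- the reversed accumulator below the current top run is inert
theorem bRunsAux_append : ∀ (cs : List Char) (t : Char × Nat) (ts acc : List (Char × Nat)),
    bRunsAux ((t :: ts) ++ acc) cs = acc.reverse ++ bRunsAux (t :: ts) cs := by
  intro cs
  induction cs with
  | nil => intro t ts acc; simp [bRunsAux]
  | cons c cs' ih =>
    intro t ts acc
    obtain ⟨c0, L⟩ := t
    by_cases hc : (c0 == c) = true
    · simp only [List.cons_append, bRunsAux, hc, if_true]
      exact ih (c0, L + 1) ts acc
    · simp only [List.cons_append, bRunsAux, hc, Bool.false_eq_true, if_false]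
      exact ih (c, 1) ((c0, L) :: ts) acc

-- merging a run into the top of the accumulator
theorem bRunsAux_run (c : Char) : ∀ (k : Nat) (L : Nat) (acc : List (Char × Nat))
    (rest : List Char),
    bRunsAux ((c, L) :: acc) (List.replicate k c ++ rest) =
      bRunsAux ((c, L + k) :: acc) rest := by
  intro k
  induction k with
  | zero => intro L acc rest; simp
  | succ k ih =>
    intro L acc rest
    rw [List.replicate_succ, List.cons_append]
    simp only [bRunsAux, beq_self_eq_true, if_true]
    rw [ih]
    have harith : L + 1 + k = L + (k + 1) := by omega
    rw [harith]

theorem takeWhile_eq_replicate (c : Char) : ∀ (l : List Char),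
    l.takeWhile (fun d => d == c) = List.replicate (l.takeWhile (fun d => d == c)).length c := by
  intro l
  induction l with
  | nil => simp
  | cons d l ih =>
    by_cases h : (d == c) = true
    · have hd : d = c := by simpa using h
      have hstep : List.takeWhile (fun d => d == c) (d :: l) =
          d :: List.takeWhile (fun d => d == c) l := by
        simp [h]
      rw [hstep, hd, List.length_cons, List.replicate_succ]
      exact congrArg (c :: ·) ih
    · simp [h]

theorem head_dropWhile_ne (c : Char) : ∀ (l : List Char) (d : Char),
    (l.dropWhile (fun d => d == c)).head? = some d → d ≠ c := by
  intro l
  induction l with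
  | nil => intro d h; simp at h
  | cons e l ih =>
    intro d h
    by_cases he : (e == c) = true
    · have hstep : List.dropWhile (fun d => d == c) (e :: l) =
          List.dropWhile (fun d => d == c) l := by
        simp [he]
      rw [hstep] at h
      exact ih d h
    · have hstep : List.dropWhile (fun d => d == c) (e :: l) = e :: l := by
        simp [he]
      rw [hstep] at h
      simp only [List.head?_cons, Option.some.injEq] at h
      subst h
      simpa using he

-- main invariant: A's state machine equals B's run decomposition on every list
theorem aList_eq_bList_bounded : ∀ (N : Nat) (l : List Char), l.length ≤ N → aList l = bList l := by
  intro N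
  induction N with
  | zero =>
    intro l h
    have : l = [] := List.eq_nil_of_length_eq_zero (Nat.le_zero.mp h)
    subst this
    rfl
  | succ N ih =>
    intro l h
    match l with
    | [] => rfl
    | c :: rest =>
      have hdecomp : rest = List.replicate ((rest.takeWhile (fun d => d == c)).length) c
          ++ rest.dropWhile (fun d => d == c) := by
        conv_lhs => rw [← List.takeWhile_append_dropWhile (p := fun d => d == c) (l := rest)]
        rw [← takeWhile_eq_replicate]
      set k := (rest.takeWhile (fun d => d == c)).length with hk
      set rest' := rest.dropWhile (fun d => d == c) with hrest'
      have hlen : rest'.length ≤ N := by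
        have h1 : rest'.length ≤ rest.length := by
          rw [hrest']; exact List.length_dropWhile_le _ _
        have h2 : rest.length ≤ N := by simpa using h
        omega
      obtain ⟨met, cdel, hrun⟩ := aLoop_run c k [] rest'
      have hA : aList (c :: rest) = aLoop c met cdel (bPiece c (k + 1)) rest' := by
        show aLoop c false false [c] rest = _
        conv_lhs => rw [hdecomp]
        have := hrun
        simpa using this
      match hr : rest' with
      | [] =>
        rw [hA]
        show bPiece c (k + 1) = bList (c :: rest)
        conv_rhs => rw [hdecomp]
        show bPiece c (k+1) = ((bRunsAux [] (c :: (List.replicate k c ++ []))).map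
          (fun r => bPiece r.1 r.2)).flatten
        rw [show bRunsAux [] (c :: (List.replicate k c ++ [])) =
            bRunsAux [(c, 1)] (List.replicate k c ++ []) from rfl,
          bRunsAux_run]
        simp [bRunsAux, Nat.add_comm]
      | d :: rs =>
        have hd : d ≠ c := head_dropWhile_ne c rest d (by rw [← hrest']; rfl)
        have hstep : aLoop c met cdel (bPiece c (k + 1)) (d :: rs) =
            aLoop d false false (bPiece c (k + 1) ++ [d]) rs := by
          have hne : (d != c) = true := by simp [bne, hd]
          simp only [aLoop, hne, if_true]
        have hpre : aLoop d false false (bPiece c (k + 1) ++ [d]) rs =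
            bPiece c (k + 1) ++ aLoop d false false [d] rs :=
          aLoop_append_left rs d false false [d] (bPiece c (k + 1)) (fun _ => ⟨[], rfl⟩)
        have hihr : aList (d :: rs) = bList (d :: rs) := by
          exact ih (d :: rs) hlen
        have hB : bList (c :: rest) = bPiece c (k + 1) ++ bList (d :: rs) := by
          conv_lhs => rw [hdecomp]
          show ((bRunsAux [] (c :: (List.replicate k c ++ (d :: rs)))).map
            (fun r => bPiece r.1 r.2)).flatten = _
          rw [show bRunsAux [] (c :: (List.replicate k c ++ (d :: rs))) =
              bRunsAux [(c, 1)] (List.replicate k c ++ (d :: rs)) from rfl,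
            bRunsAux_run]
          rw [show bRunsAux [(c, 1 + k)] (d :: rs) =
              bRunsAux ([(d, 1)] ++ [(c, 1 + k)]) rs by
            have hne2 : (c == d) = false := by
              simp only [beq_eq_false_iff_ne, ne_eq]
              exact fun hcd => hd hcd.symm
            simp only [bRunsAux, hne2, Bool.false_eq_true, if_false]; rfl]
          rw [bRunsAux_append]
          show (((([(c, 1 + k)].reverse) ++ bRunsAux [(d, 1)] rs)).map
            (fun r => bPiece r.1 r.2)).flatten = _
          simp only [List.reverse_cons, List.reverse_nil, List.nil_append,
            List.map_append, List.flatten_append, List.map_cons, List.map_nil,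
            List.flatten_cons, List.flatten_nil, List.append_nil]
          rw [Nat.add_comm 1 k]
          rfl
        rw [hA, hstep, hpre, hB]
        exact congrArg (fun x => bPiece c (k + 1) ++ x) hihr

theorem aList_eq_bList (l : List Char) : aList l = bList l :=
  aList_eq_bList_bounded l.length l (Nat.le_refl _)

-- ===== VERDICT (by name: the statement is the Claim_ definition above) =====
theorem format_stepan_word_spec : Claim_equal_format_stepan_word := by
  intro s n _ _
  unfold Spec_format_stepan_word format_stepan_word format_stepan_word_alt
  cases h : s.toList.take ((n.getD ((s.toList.length : Nat) : Int)).toNat) with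
  | nil =>
    simp only [h]
    rfl
  | cons c rest =>
    simp only [h]
    have := aList_eq_bList (c :: rest)
    simp only [aList, bList] at this
    rw [this]
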